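-- pv_equiv track=rewrite | github.com/WillDreamer/ARLArena | recipe/game_agent/json_to_parquet.py | keep_single_image_token
-- ===== SOURCE A (Python) =====
-- def keep_single_image_token(text: str) -> str:
--     # 如果没有 <image>，原样返回
--     if "<image>" not in text:
--         return text
--     # 只保留第一个，把后面的都删掉
--     first = True
--     parts = []
--     for seg in text.split("<image>"):
--         if first:
--             parts.append(seg)
--             parts.append("<image>")
--             first = False
--         else:
--             parts.append(seg)
--     return "".join(parts)
-- ===== SOURCE B (Python) =====
-- def keep_single_image_token(text: str) -> str:
--     idx = text.find("<image>")
--     if idx == -1: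
--         return text
--     end = idx + len("<image>")
--     return text[:idx] + "<image>" + text[end:].replace("<image>", "")
-- ===== Notes on version B (the rewrite author's own statement) =====
-- stated objective: idiomatic
-- what changed: Replaces the split-on-every-marker-then-rejoin loop with a first/boolean flag by locating the first occurrence with find and stripping all later markers from the tail with one replace.
import Mathlib
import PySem

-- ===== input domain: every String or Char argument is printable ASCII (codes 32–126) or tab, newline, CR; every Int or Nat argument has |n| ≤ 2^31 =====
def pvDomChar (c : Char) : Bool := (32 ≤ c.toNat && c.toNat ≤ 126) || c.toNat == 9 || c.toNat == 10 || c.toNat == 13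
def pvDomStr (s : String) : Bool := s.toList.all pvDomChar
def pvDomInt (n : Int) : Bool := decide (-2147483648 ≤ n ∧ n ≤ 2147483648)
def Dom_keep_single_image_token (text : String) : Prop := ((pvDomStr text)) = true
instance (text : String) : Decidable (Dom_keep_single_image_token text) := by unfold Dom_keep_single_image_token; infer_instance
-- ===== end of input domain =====

-- B keeps only the first "<image>" marker by locating it with find and stripping the
-- tail with one replace, instead of A's split-on-all-markers-then-rejoin loop with a flag.

-- ===== PORT A =====
def keep_single_image_token (text : String) : String :=
  if PySem.Str.isIn "<image>" text = false then text
  else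
    -- text.split("<image>"): the separator is a nonempty literal, so split? is always `some`
    let segs := (PySem.Str.split? text "<image>").getD []
    let res := segs.foldl
      (fun (st : Bool × List String) seg =>
        if st.1 then (false, st.2 ++ [seg, "<image>"])
        else (st.1, st.2 ++ [seg])) (true, [])
    PySem.Str.join "" res.2

-- ===== PORT B =====
def keep_single_image_token_alt (text : String) : String :=
  let idx := PySem.Str.find text "<image>"
  if idx = -1 then text
  else
    let endI := idx + PySem.Str.len "<image>"
    PySem.Str.slice text none (some idx) ++ "<image>" ++
      PySem.Str.replace (PySem.Str.slice text (some endI) none) "<image>" ""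

-- ===== PRECONDITION & SPEC =====
def Spec_keep_single_image_token (text : String) (out : String) : Prop := out = keep_single_image_token_alt text
instance (text : String) (out : String) : Decidable (Spec_keep_single_image_token text out) := by unfold Spec_keep_single_image_token; infer_instance

-- ===== CLAIM (what is proved, stated in full; the proofs are below) =====
def Claim_equal_keep_single_image_token : Prop := ∀ (text : String), Dom_keep_single_image_token text → Spec_keep_single_image_token text (keep_single_image_token text)

-- ===== LEMMAS AND PROOFS =====

-- A's fold, once the flag is false, just appends the remaining segments
theorem fold_after_first (xs : List String) (p0 : List String) :
    xs.foldl
      (fun (st : Bool × List String) seg =>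
        if st.1 then (false, st.2 ++ [seg, "<image>"])
        else (st.1, st.2 ++ [seg])) (false, p0) = (false, p0 ++ xs) := by
  induction xs generalizing p0 with
  | nil => simp
  | cons x xs ih => simp [ih]

theorem sog_fuel (sep : List Char) (hsep : sep ≠ []) :
    ∀ (f : Nat) (l cur : List Char) (acc : List (List Char)), l.length ≤ f →
    PySem.Chars.splitOn.go sep f l cur acc = PySem.Chars.splitOn.go sep l.length l cur acc := by
  intro f
  induction f using Nat.strong_induction_on with
  | _ f ih =>
    intro l cur acc h
    match f, l with
    | 0, l =>
      have : l = [] := List.eq_nil_of_length_eq_zero (Nat.le_zero.mp h)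
      subst this; rfl
    | f+1, [] => simp [PySem.Chars.splitOn.go]
    | f+1, c::t =>
      have hlen : 1 ≤ sep.length := by
        cases sep with | nil => exact absurd rfl hsep | cons a b => simp
      have hlt : (c :: t).length = t.length + 1 := rfl
      rw [PySem.Chars.splitOn.go, hlt]
      conv_rhs => rw [PySem.Chars.splitOn.go]
      simp only [List.length_cons] at h
      split
      · have hd : (List.drop sep.length (c :: t)).length ≤ f := by
          simp only [List.length_drop, List.length_cons]; omega
        have hd2 : (List.drop sep.length (c :: t)).length ≤ t.length := by
          simp only [List.length_drop, List.length_cons]; omega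
        rw [ih f (Nat.lt_succ_self f) _ _ _ hd,
            ih t.length (by omega) _ _ _ hd2]
      · rw [ih f (Nat.lt_succ_self f) _ _ _ (by omega)]

theorem sog_shape (sep : List Char) (f : Nat) :
    ∀ (l cur : List Char) (acc : List (List Char)),
    PySem.Chars.splitOn.go sep f l cur acc =
      acc.reverse ++ List.modifyHead (cur.reverse ++ ·) (PySem.Chars.splitOn.go sep f l [] []) := by
  induction f with
  | zero => intro l cur acc; simp [PySem.Chars.splitOn.go]
  | succ f ih =>
    intro l cur acc
    cases l with
    | nil => simp [PySem.Chars.splitOn.go]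
    | cons c t =>
      rw [PySem.Chars.splitOn.go]
      conv_rhs => rw [PySem.Chars.splitOn.go]
      split
      · rw [ih _ [] (cur.reverse :: acc), ih _ [] ([].reverse :: [])]
        simp
      · rw [ih _ (c :: cur) acc, ih _ (c :: []) []]
        simp [List.modifyHead_modifyHead, Function.comp_def]

theorem rg_acc (sep new : List Char) (f : Nat) :
    ∀ (l acc : List Char),
    PySem.Chars.replace.go sep new f l acc = acc.reverse ++ PySem.Chars.replace.go sep new f l [] := by
  induction f with
  | zero => intro l acc; simp [PySem.Chars.replace.go]
  | succ f ih =>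
    intro l acc
    cases l with
    | nil => simp [PySem.Chars.replace.go]
    | cons c t =>
      rw [PySem.Chars.replace.go]
      conv_rhs => rw [PySem.Chars.replace.go]
      split
      · rw [ih _ (new.reverse ++ acc), ih _ (new.reverse ++ [])]
        simp
      · rw [ih _ (c :: acc), ih _ (c :: [])]
        simp

theorem sog_ne_nil' (sep : List Char) (f : Nat) :
    ∀ (l cur : List Char) (acc : List (List Char)),
    PySem.Chars.splitOn.go sep f l cur acc ≠ [] := by
  induction f with
  | zero => intro l cur acc; simp [PySem.Chars.splitOn.go]
  | succ f ih =>
    intro l cur acc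
    cases l with
    | nil => simp [PySem.Chars.splitOn.go]
    | cons c t =>
      rw [PySem.Chars.splitOn.go]
      split
      · exact ih _ _ _
      · exact ih _ _ _

theorem flatten_splitOn (sep : List Char) (f : Nat) :
    ∀ (l : List Char),
    (PySem.Chars.splitOn.go sep f l [] []).flatten = PySem.Chars.replace.go sep [] f l [] := by
  induction f with
  | zero => intro l; simp [PySem.Chars.splitOn.go, PySem.Chars.replace.go]
  | succ f ih =>
    intro l
    cases l with
    | nil => simp [PySem.Chars.splitOn.go, PySem.Chars.replace.go]
    | cons c t =>
      rw [PySem.Chars.splitOn.go, PySem.Chars.replace.go]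
      split
      · rw [sog_shape sep f _ [] ([].reverse :: [])]
        have hid : (fun x : List Char => x) = id := rfl
        simp only [List.reverse_nil, List.nil_append, hid, List.modifyHead_id]
        exact ih _
      · rw [sog_shape sep f t [c] [], rg_acc sep [] f t [c]]
        have hne := sog_ne_nil' sep f t [] []
        cases hgo : PySem.Chars.splitOn.go sep f t [] [] with
        | nil => exact absurd hgo hne
        | cons p ps =>
          have h2 := ih t
          rw [hgo] at h2
          simp only [List.reverse_cons, List.reverse_nil, List.nil_append,
            List.modifyHead_cons, List.flatten_cons] at h2 ⊢
          rw [← h2]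
          simp

theorem replace_empty_eq_flatten (sep : List Char) (hsep : sep ≠ []) (l : List Char) :
    PySem.Chars.replace l sep [] = (PySem.Chars.splitOn l sep).flatten := by
  rw [PySem.Chars.replace, PySem.Chars.splitOn]
  rw [if_neg (by simpa [List.isEmpty_iff] using hsep)]
  rw [sog_fuel sep hsep (l.length + 1) l [] [] (Nat.le_succ _)]
  exact (flatten_splitOn sep l.length l).symm

theorem fg_off (sep : List Char) (hsep : sep ≠ []) :
    ∀ (l : List Char) (k : Nat), PySem.Chars.find.go sep l k =
      if PySem.Chars.find.go sep l 0 = -1 then -1 else PySem.Chars.find.go sep l 0 + k := by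
  intro l
  induction l with
  | nil =>
    intro k
    rw [PySem.Chars.find.go, PySem.Chars.find.go]
    simp [List.isEmpty_iff, hsep]
  | cons c t ih =>
    intro k
    rw [PySem.Chars.find.go]
    conv_rhs => rw [PySem.Chars.find.go]
    split
    · simp
    · rw [ih (k + 1), ih 1]
      split
      · simp
      · rename_i hne
        have hfind : PySem.Chars.find.go sep t 0 = PySem.Chars.find t sep := rfl
        have h1 := PySem.Chars.neg_one_le_find t sep
        rw [hfind] at hne ⊢
        split
        · rename_i hc; omega
        · push_cast; ring

theorem join_nil_sep (ps : List (List Char)) : PySem.Chars.join [] ps = ps.flatten := by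
  induction ps with
  | nil => simp [PySem.Chars.join_nil]
  | cons p ps ih =>
    cases ps with
    | nil => simp [PySem.Chars.join_singleton]
    | cons q rest => simp [PySem.Chars.join_cons_cons, ih]

theorem splitOn_cons_of_prefix (sep : List Char) (hsep : sep ≠ []) (c : Char) (t : List Char)
    (hpre : sep.isPrefixOf (c :: t) = true) :
    PySem.Chars.splitOn (c :: t) sep = [] :: PySem.Chars.splitOn (List.drop sep.length (c :: t)) sep := by
  rw [PySem.Chars.splitOn, PySem.Chars.splitOn]
  have hstep : PySem.Chars.splitOn.go sep ((c :: t).length + 1) (c :: t) [] [] =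
      PySem.Chars.splitOn.go sep (c :: t).length (List.drop sep.length (c :: t)) [] [[]] := by
    rw [PySem.Chars.splitOn.go, if_pos hpre]; simp
  rw [hstep, sog_shape]
  have hid : (fun x : List Char => x) = id := rfl
  have hd1 : (List.drop sep.length (c :: t)).length ≤ (c :: t).length := by
    simp
  rw [sog_fuel sep hsep _ _ _ _ hd1,
      sog_fuel sep hsep _ _ _ _ (Nat.le_succ _)]
  simp [hid, List.modifyHead_id]

theorem splitOn_cons_of_not_prefix (sep : List Char) (hsep : sep ≠ []) (c : Char) (t : List Char)
    (hpre : ¬ sep.isPrefixOf (c :: t) = true) :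
    PySem.Chars.splitOn (c :: t) sep =
      List.modifyHead (c :: ·) (PySem.Chars.splitOn t sep) := by
  rw [PySem.Chars.splitOn, PySem.Chars.splitOn]
  have hstep : PySem.Chars.splitOn.go sep ((c :: t).length + 1) (c :: t) [] [] =
      PySem.Chars.splitOn.go sep (c :: t).length t [c] [] := by
    rw [PySem.Chars.splitOn.go, if_neg hpre]
  rw [hstep, sog_shape]
  rw [sog_fuel sep hsep _ _ _ _ (by simp),
      sog_fuel sep hsep _ _ _ _ (Nat.le_succ _)]
  simp

theorem main_core (sep : List Char) (hsep : sep ≠ []) (n : Nat) :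
    ∀ (l : List Char), l.length ≤ n → PySem.Chars.find l sep ≠ -1 →
    PySem.Chars.join []
        (match PySem.Chars.splitOn l sep with
          | [] => []
          | p :: ps => p :: sep :: ps) =
      l.take (PySem.Chars.find l sep).toNat ++ sep ++
        PySem.Chars.replace (l.drop ((PySem.Chars.find l sep) + sep.length).toNat) sep [] := by
  induction n with
  | zero =>
    intro l hl hf
    have : l = [] := List.eq_nil_of_length_eq_zero (Nat.le_zero.mp hl)
    subst this
    exfalso
    apply hf
    rw [PySem.Chars.find, PySem.Chars.find.go]
    simp [List.isEmpty_iff, hsep]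
  | succ n ih =>
    intro l hl hf
    cases l with
    | nil =>
      exfalso
      apply hf
      rw [PySem.Chars.find, PySem.Chars.find.go]
      simp [List.isEmpty_iff, hsep]
    | cons c t =>
      by_cases hpre : sep.isPrefixOf (c :: t) = true
      · have hfind : PySem.Chars.find (c :: t) sep = 0 := by
          rw [PySem.Chars.find, PySem.Chars.find.go, if_pos hpre]; rfl
        rw [hfind, splitOn_cons_of_prefix sep hsep c t hpre]
        rw [replace_empty_eq_flatten sep hsep]
        rw [join_nil_sep]
        simp
      · have hfind : PySem.Chars.find (c :: t) sep =
            if PySem.Chars.find t sep = -1 then -1 else PySem.Chars.find t sep + 1 := by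
          rw [PySem.Chars.find, PySem.Chars.find.go, if_neg hpre]
          exact fg_off sep hsep t 1
        have hnt : PySem.Chars.find t sep ≠ -1 := by
          intro h0; rw [hfind, if_pos h0] at hf; exact hf rfl
        rw [if_neg hnt] at hfind
        have hk : 0 ≤ PySem.Chars.find t sep := by
          have := PySem.Chars.neg_one_le_find t sep; omega
        rw [hfind, splitOn_cons_of_not_prefix sep hsep c t hpre]
        have hne := sog_ne_nil' sep (t.length + 1) t [] []
        cases hgo : PySem.Chars.splitOn t sep with
        | nil => rw [PySem.Chars.splitOn] at hgo; exact absurd hgo hne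
        | cons p ps =>
          have hih := ih t (by simpa using Nat.lt_succ_iff.mp (Nat.lt_of_lt_of_le (Nat.lt_succ_self _) hl)) hnt
          rw [hgo] at hih
          simp only [List.modifyHead_cons]
          rw [join_nil_sep] at hih ⊢
          have h1 : (PySem.Chars.find t sep + 1).toNat = (PySem.Chars.find t sep).toNat + 1 := by omega
          have h2 : (PySem.Chars.find t sep + 1 + (sep.length : Int)).toNat =
              (PySem.Chars.find t sep + (sep.length : Int)).toNat + 1 := by omega
          rw [h1, h2]
          simp only [List.take_succ_cons, List.drop_succ_cons, List.flatten_cons] at hih ⊢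
          simp only [List.cons_append, List.append_assoc] at hih ⊢
          rw [hih]


-- ===== VERDICT (by name: the statement is the Claim_ definition above) =====
theorem keep_single_image_token_spec : Claim_equal_keep_single_image_token := by
  intro text _
  unfold Spec_keep_single_image_token keep_single_image_token keep_single_image_token_alt
  have hsl : ("<image>".toList : List Char) ≠ [] := by decide
  have hlit : ("<image>".toList : List Char) = ['<','i','m','a','g','e','>'] := by decide
  by_cases hf : PySem.Chars.find text.toList "<image>".toList = -1
  · have hA : PySem.Str.isIn "<image>" text = false := by
      rw [hlit] at hf
      simp [PySem.Str.isIn, PySem.Chars.isIn, hf]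
    have hB : PySem.Str.find text "<image>" = -1 := by rw [PySem.Str.find, hlit]; exact hf
    rw [if_pos hA]
    rw [if_pos hB]
  · have hA : ¬ (PySem.Str.isIn "<image>" text = false) := by
      rw [hlit] at hf
      simp [PySem.Str.isIn, PySem.Chars.isIn, hf]
    have hB : ¬ (PySem.Str.find text "<image>" = -1) := by rw [PySem.Str.find, hlit]; exact hf
    rw [if_neg hA, if_neg hB]
    apply String.toList_inj.mp
    have hsplit : PySem.Str.split? text "<image>" =
        some ((PySem.Chars.splitOn text.toList "<image>".toList).map String.ofList) := by
      rw [PySem.Str.split?, PySem.Chars.split?, if_neg (by simp)]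
      rfl
    rw [hsplit]
    have hne := sog_ne_nil' "<image>".toList (text.toList.length + 1) text.toList [] []
    cases hgo : PySem.Chars.splitOn text.toList "<image>".toList with
    | nil => rw [PySem.Chars.splitOn] at hgo; exact absurd hgo hne
    | cons p ps =>
      simp only [Option.getD_some, List.map_cons, List.foldl_cons, List.nil_append, if_true]
      rw [fold_after_first]
      have hmain := main_core "<image>".toList hsl text.toList.length text.toList le_rfl hf
      rw [hgo] at hmain
      have hk : 0 ≤ PySem.Chars.find text.toList "<image>".toList := by
        have := PySem.Chars.neg_one_le_find text.toList "<image>".toList; omega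
      rw [PySem.Str.toList_join]
      simp only [List.map_cons, List.map_map, String.toList_ofList,
        Function.comp_def, List.cons_append, List.nil_append]
      have hmain2 : PySem.Chars.join [] (p :: "<image>".toList :: ps) =
          List.take (PySem.Chars.find text.toList "<image>".toList).toNat text.toList ++ "<image>".toList ++
            PySem.Chars.replace
              (List.drop (PySem.Chars.find text.toList "<image>".toList + ("<image>".toList.length : Int)).toNat text.toList)
              "<image>".toList [] := hmain
      have hnil : ("".toList : List Char) = [] := by decide
      have hk7 : (0 : Int) ≤ PySem.Chars.find text.toList "<image>".toList + ("<image>".toList.length : Int) := by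
        have : (0 : Int) ≤ ("<image>".toList.length : Int) := by positivity
        omega
      simp only [hnil, List.map_id_fun', id]
      rw [hmain2]
      simp only [String.toList_append, PySem.Str.toList_slice, PySem.Str.toList_replace,
        PySem.Chars.slice_eq_listSlice, PySem.Str.find, PySem.Str.len,
        PySem.List.slice_to _ hk, PySem.List.slice_from _ hk7, hnil]
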